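-- pv_equiv track=rewrite | github.com/Tanvisusarla/DSD-Project | ImplicationTable.py | unite2
-- ===== SOURCE A (Python) =====
-- def unite2(grpM,grpN):
--         ref=[]
--         for w in grpM :
--                 for z in grpN:
--                         x = w.find("-")
--                         y = z.find("-")
--                         if(x==y):
--                                 temp1=list(w)
--                                 temp2=list(z)
--                                 for i in range(len(temp1)):
--     	                                if(temp1[i]!=temp2[i]):
--                                                 temp1[i]='*'
--
--                                 a = "".join(temp1)
--                                 c = a.count('*')
--                                 if c == 1:
--                                         rep=a.replace('*','-')
--                                         if rep not in ref:
--                                             ref.append(rep)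
--
--
--
--
--         return ref
-- ===== SOURCE B (Python) =====
-- def unite2(grpM, grpN):
--     # Bucket grpN once by the index of '-', then for each w scan only its bucket,
--     # collect the differing positions directly and deduplicate through a set.
--     groups = {}
--     for z in grpN:
--         groups.setdefault(z.find("-"), []).append(z)
--     ref = []
--     seen = set()
--     for w in grpM:
--         for z in groups.get(w.find("-"), []):
--             diffs = [i for i, (cw, cz) in enumerate(zip(w, z)) if cw != cz]
--             if len(diffs) == 1:
--                 i = diffs[0]
--                 rep = w[:i] + '-' + w[i + 1:]
--                 if rep not in seen:
--                     seen.add(rep)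
--                     ref.append(rep)
--     return ref
-- ===== Notes on version B (the rewrite author's own statement) =====
-- stated objective: alternative
-- what changed: B buckets grpN once in a dict keyed by the index of '-' (so the per-pair find-comparison over all of grpN disappears), collects the differing positions directly instead of building a mask string then counting and replacing stars, and deduplicates through a set instead of a linear 'rep not in ref' scan; …
-- outside the precondition, e.g. on unite2(['*a'], ['*b']): A returns [], B returns ['*-']
import Mathlib
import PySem

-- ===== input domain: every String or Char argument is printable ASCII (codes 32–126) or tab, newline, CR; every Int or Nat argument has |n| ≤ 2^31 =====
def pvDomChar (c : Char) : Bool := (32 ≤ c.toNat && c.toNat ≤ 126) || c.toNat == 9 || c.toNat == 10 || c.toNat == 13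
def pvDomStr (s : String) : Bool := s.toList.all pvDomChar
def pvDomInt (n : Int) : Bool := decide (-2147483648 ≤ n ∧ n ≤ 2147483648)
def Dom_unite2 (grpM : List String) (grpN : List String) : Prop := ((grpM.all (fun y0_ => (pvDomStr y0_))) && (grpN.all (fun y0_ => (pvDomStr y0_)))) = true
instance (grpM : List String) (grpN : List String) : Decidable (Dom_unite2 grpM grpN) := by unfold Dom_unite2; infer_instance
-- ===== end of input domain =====

-- B buckets grpN once by the index of '-', collects the differing positions of each pair
-- directly, and deduplicates through a set (an alternative one-pass-per-pair structure).

-- ===== PORT A =====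
def unite2 (grpM : List String) (grpN : List String) : List String :=
  grpM.foldl (fun ref w =>
    grpN.foldl (fun ref z =>
      let x := PySem.Str.find w "-"
      let y := PySem.Str.find z "-"
      if x == y then
        let temp2 := z.toList
        let temp1 := (PySem.List.pyRange 0 (w.toList.length : Int)).foldl
          (fun t i => if PySem.List.pyGetD t i ' ' ≠ PySem.List.pyGetD temp2 i ' '
                      then PySem.List.pySetD t i '*' else t) w.toList
        let a := String.ofList temp1
        let c := PySem.Str.count a "*"
        if c == 1 then
          let rep := PySem.Str.replace a "*" "-"
          if ref.contains rep then ref else ref ++ [rep]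
        else ref
      else ref) ref) []

-- ===== PORT B =====
def unite2_alt (grpM : List String) (grpN : List String) : List String :=
  let groups : PySem.Dict Int (List String) :=
    grpN.foldl (fun d z => d.modify (PySem.Str.find z "-") [] (fun l => l ++ [z])) PySem.Dict.empty
  (grpM.foldl (fun (st : List String × PySem.Set String) w =>
    (groups.getD (PySem.Str.find w "-") []).foldl (fun st z =>
      let diffs := ((PySem.List.enumerate (w.toList.zip z.toList)).filter
                      (fun p => p.2.1 != p.2.2)).map (fun p => p.1)
      if diffs.length == 1 then
        let i := PySem.List.pyGetD diffs 0 0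
        let rep := String.ofList (PySem.List.slice w.toList none (some i) ++ ['-'] ++
                                  PySem.List.slice w.toList (some (i + 1)) none)
        if PySem.Set.contains st.2 rep then st else (st.1 ++ [rep], PySem.Set.add st.2 rep)
      else st) st) (([] : List String), PySem.Set.empty)).1

-- ===== PRECONDITION & SPEC =====
-- Pre_ excludes (i) inputs where Python A raises IndexError (a pair whose '-' indices agree
-- but with z shorter than w), and (ii) pairs with matching '-' index carrying '*' — the
-- sentinel character this helper reserves internally, never present in the 0/1/'-' minterm
-- strings it combines — at the same position of both strings: on that unspecified corner A
-- counts the shared star as a difference and B does not, and neither reading is more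
-- defensible than the other.
def Pre_unite2 (grpM : List String) (grpN : List String) : Prop :=
  ∀ w ∈ grpM, ∀ z ∈ grpN,
    PySem.Str.find w "-" = PySem.Str.find z "-" →
      PySem.Str.len w ≤ PySem.Str.len z ∧ ('*', '*') ∉ w.toList.zip z.toList
instance (grpM : List String) (grpN : List String) : Decidable (Pre_unite2 grpM grpN) := by
  unfold Pre_unite2; infer_instance
def pvWitness_unite2 : List String × List String := (["0-1", "1-0"], ["1-1"])
def Spec_unite2 (grpM : List String) (grpN : List String) (out : List String) : Prop :=
  out = unite2_alt grpM grpN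
instance (grpM : List String) (grpN : List String) (out : List String) :
    Decidable (Spec_unite2 grpM grpN out) := by unfold Spec_unite2; infer_instance

-- ===== CLAIM (what is proved, stated in full; the proofs are below) =====
def Claim_equal_unite2 : Prop := ∀ (grpM : List String) (grpN : List String),
  Dom_unite2 grpM grpN → Pre_unite2 grpM grpN → Spec_unite2 grpM grpN (unite2 grpM grpN)

-- ===== LEMMAS AND PROOFS =====

-- '*' → '-' (the effect of a.replace('*','-'))
def star2dash (c : Char) : Char := if c = '*' then '-' else c

-- the mask A builds: '*' where w and z (padded with the pyGetD default) differ
def maskAB : List Char → List Char → List Char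
  | [], _ => []
  | c :: w', zs => (if c ≠ zs.headD ' ' then '*' else c) :: maskAB w' zs.tail

-- dedup-append steps of A (list membership) and B (set membership)
def ddA (ref : List String) : Option String → List String
  | some r => if ref.contains r then ref else ref ++ [r]
  | none => ref

def ddB (st : List String × PySem.Set String) : Option String → List String × PySem.Set String
  | some r => if PySem.Set.contains st.2 r then st else (st.1 ++ [r], PySem.Set.add st.2 r)
  | none => st

-- the value both programs emit for a pair (w, z) in the same '-' bucket
def pairRep (w z : String) : Option String :=
  let m := maskAB w.toList z.toList
  if m.count '*' = 1 then some (String.ofList (m.map star2dash)) else none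

lemma headD_drop (zl : List Char) (k : Nat) (d : Char) :
    (zl.drop k).headD d = PySem.List.pyGetD zl (k : Int) d := by
  simp only [PySem.List.pyGetD, PySem.List.pyGet?_natCast, List.headD_eq_head?_getD,
    List.head?_drop]

lemma maskAB_no_star (wl : List Char) : ∀ zl, (maskAB wl zl).count '*' = 0 →
    maskAB wl zl = wl := by
  induction wl with
  | nil => intro zl _; rfl
  | cons c w' ih =>
    intro zl h
    by_cases hc : c = zl.headD ' '
    · have hm : maskAB (c :: w') zl = c :: maskAB w' zl.tail := by
        rw [maskAB, if_neg (fun hne => hne hc)]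
      rw [hm] at h ⊢
      have h' : (maskAB w' zl.tail).count '*' = 0 := by
        rw [List.count_cons] at h; omega
      rw [ih zl.tail h']
    · have hm : maskAB (c :: w') zl = '*' :: maskAB w' zl.tail := by
        rw [maskAB, if_pos hc]
      rw [hm] at h
      simp at h

lemma map_star2dash_id (m : List Char) (h : m.count '*' = 0) : m.map star2dash = m := by
  induction m with
  | nil => rfl
  | cons c m' ih =>
    simp only [List.count_cons] at h
    have hc : c ≠ '*' := by intro hc; simp [hc] at h
    have h' : m'.count '*' = 0 := by simpa [hc] using h
    simp [star2dash, hc, ih h']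

lemma maskA_fold (zl : List Char) :
    ∀ (suf pre : List Char),
      (PySem.List.pyRange (pre.length : Int) ((pre.length : Int) + suf.length)).foldl
        (fun t i => if PySem.List.pyGetD t i ' ' ≠ PySem.List.pyGetD zl i ' '
                    then PySem.List.pySetD t i '*' else t) (pre ++ suf)
      = pre ++ maskAB suf (zl.drop pre.length) := by
  intro suf
  induction suf with
  | nil =>
    intro pre
    simp [maskAB]
  | cons c suf' ih =>
    intro pre
    have hlt : (pre.length : Int) < (pre.length : Int) + ((c :: suf').length : Int) := by
      simp only [List.length_cons]; push_cast; omega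
    rw [PySem.List.pyRange_one_cons hlt]
    simp only [List.foldl_cons]
    have hget : PySem.List.pyGetD (pre ++ c :: suf') (pre.length : Int) ' ' = c := by
      simp [PySem.List.pyGetD]
    have hz : PySem.List.pyGetD zl (pre.length : Int) ' ' = (zl.drop pre.length).headD ' ' :=
      (headD_drop zl pre.length ' ').symm
    have hset : PySem.List.pySetD (pre ++ c :: suf') (pre.length : Int) '*' = pre ++ '*' :: suf' := by
      simp [PySem.List.pySetD, PySem.List.pySet?, PySem.List.pyIdx?]
    have key : ∀ e : Char,
        (PySem.List.pyRange ((pre.length : Int) + 1) ((pre.length : Int) + ((c :: suf').length : Nat))).foldl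
          (fun t i => if PySem.List.pyGetD t i ' ' ≠ PySem.List.pyGetD zl i ' '
                      then PySem.List.pySetD t i '*' else t) (pre ++ e :: suf')
        = pre ++ e :: maskAB suf' (zl.drop (pre.length + 1)) := by
      intro e
      have h1 := ih (pre ++ [e])
      have harith0 : (pre ++ [e]).length = pre.length + 1 := by simp
      rw [harith0] at h1
      push_cast at h1
      have hb : ((pre.length : Int) + 1 + (suf'.length : Int))
          = (pre.length : Int) + ((c :: suf').length : Nat) := by
        simp only [List.length_cons]; push_cast; ring
      rw [hb] at h1
      simpa [List.append_assoc] using h1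
    by_cases hc : c = (zl.drop pre.length).headD ' '
    · rw [if_neg (by rw [hget, hz]; exact fun hne => hne hc)]
      have hm : maskAB (c :: suf') (zl.drop pre.length)
          = c :: maskAB suf' (zl.drop (pre.length + 1)) := by
        rw [maskAB, if_neg (fun hne => hne hc), List.tail_drop]
      rw [hm, key c]
    · rw [if_pos (by rw [hget, hz]; exact hc), hset]
      have hm : maskAB (c :: suf') (zl.drop pre.length)
          = '*' :: maskAB suf' (zl.drop (pre.length + 1)) := by
        rw [maskAB, if_pos hc, List.tail_drop]
      rw [hm, key '*']

lemma replace_star_go (fuel : Nat) :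
    ∀ (l acc : List Char), l.length ≤ fuel →
      PySem.Chars.replace.go ['*'] ['-'] fuel l acc = acc.reverse ++ l.map star2dash := by
  induction fuel with
  | zero =>
    intro l acc h
    have : l = [] := List.eq_nil_of_length_eq_zero (Nat.le_zero.mp h)
    subst this
    simp [PySem.Chars.replace.go]
  | succ fuel ih =>
    intro l acc h
    cases l with
    | nil => simp [PySem.Chars.replace.go]
    | cons c t =>
      by_cases hc : c = '*'
      · have hp : (['*'].isPrefixOf (c :: t)) = true := by simp [List.isPrefixOf, hc]
        simp only [PySem.Chars.replace.go, hp, if_true]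
        rw [show List.drop (['*'] : List Char).length (c :: t) = t from by simp,
            show ((['-'] : List Char).reverse ++ acc) = '-' :: acc from by simp]
        rw [ih t ('-' :: acc) (by simp at h ⊢; omega)]
        simp [star2dash, hc]
      · have hp : (['*'].isPrefixOf (c :: t)) = false := by
          simp [List.isPrefixOf]
          exact fun h => hc h.symm
        simp only [PySem.Chars.replace.go, hp, Bool.false_eq_true, if_false]
        rw [ih t (c :: acc) (by simp at h ⊢; omega)]
        simp [star2dash, hc]

lemma replace_star (s : List Char) : PySem.Chars.replace s ['*'] ['-'] = s.map star2dash := by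
  rw [PySem.Chars.replace]
  simp only [List.isEmpty_cons, Bool.false_eq_true, if_false]
  simpa using replace_star_go s.length s [] le_rfl

lemma count_single_go (fuel : Nat) :
    ∀ (l : List Char) (acc : Nat), l.length ≤ fuel →
      PySem.Chars.count.go ['*'] fuel l acc = acc + l.count '*' := by
  induction fuel with
  | zero =>
    intro l acc h
    have : l = [] := List.eq_nil_of_length_eq_zero (Nat.le_zero.mp h)
    subst this
    simp [PySem.Chars.count.go]
  | succ fuel ih =>
    intro l acc h
    cases l with
    | nil => simp [PySem.Chars.count.go]
    | cons c t =>
      by_cases hc : c = '*'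
      · have hp : (['*'].isPrefixOf (c :: t)) = true := by simp [List.isPrefixOf, hc]
        simp only [PySem.Chars.count.go, hp, if_true]
        rw [show List.drop (['*'] : List Char).length (c :: t) = t from by simp]
        rw [ih t (acc + 1) (by simp at h ⊢; omega)]
        simp [hc]
        omega
      · have hp : (['*'].isPrefixOf (c :: t)) = false := by
          simp [List.isPrefixOf]
          exact fun h => hc h.symm
        simp only [PySem.Chars.count.go, hp, Bool.false_eq_true, if_false]
        rw [ih t acc (by simp at h ⊢; omega)]
        simp [hc]

lemma count_single (s : List Char) : PySem.Chars.count s ['*'] = s.count '*' := by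
  rw [PySem.Chars.count]
  simp only [List.isEmpty_cons, Bool.false_eq_true, if_false]
  simpa using count_single_go s.length s 0 le_rfl

-- B's differing-position list equals the star-position list of A's mask
lemma diffs_eq_stars (wl : List Char) :
    ∀ (zl : List Char) (k : Int), ('*', '*') ∉ wl.zip zl → wl.length ≤ zl.length →
      ((PySem.List.enumerate (wl.zip zl) k).filter (fun p => p.2.1 != p.2.2)).map (fun p => p.1)
        = ((PySem.List.enumerate (maskAB wl zl) k).filter (fun p => p.2 == '*')).map (fun p => p.1) := by
  induction wl with
  | nil => intro zl k _ _; simp [maskAB]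
  | cons c w' ih =>
    intro zl k hstar hlen
    cases zl with
    | nil => simp at hlen
    | cons d z' =>
      have hstar' : ('*', '*') ∉ w'.zip z' := by
        intro h; exact hstar (by simp [List.zip_cons_cons]; right; exact h)
      have hlen' : w'.length ≤ z'.length := by simp at hlen; omega
      have hm : maskAB (c :: w') (d :: z')
          = (if c ≠ d then '*' else c) :: maskAB w' z' := by
        simp [maskAB]
      rw [hm]
      simp only [List.zip_cons_cons, PySem.List.enumerate_cons, List.filter_cons]
      by_cases hcd : c = d
      · have h1 : ((k, c, d).2.1 != (k, c, d).2.2) = false := by simp [hcd]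
        have hds : d ≠ '*' := by
          intro hd
          exact hstar (by simp [List.zip_cons_cons, hcd ▸ hd, hd])
        have h2 : (((if c ≠ d then '*' else c) : Char) == '*') = false := by
          simp [hcd, hds]
        simp only [h1, h2, Bool.false_eq_true, if_false]
        exact ih z' (k + 1) hstar' hlen'
      · have h1 : ((k, c, d).2.1 != (k, c, d).2.2) = true := by simp [hcd]
        have h2 : (((if c ≠ d then '*' else c) : Char) == '*') = true := by simp [hcd]
        simp only [h1, h2, if_true, List.map_cons]
        rw [ih z' (k + 1) hstar' hlen']

lemma star_filter_length (m : List Char) :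
    ∀ k : Int, ((PySem.List.enumerate m k).filter (fun p => p.2 == '*')).length
        = m.count '*' := by
  induction m with
  | nil => intro k; simp
  | cons c m' ih =>
    intro k
    simp only [PySem.List.enumerate_cons, List.filter_cons]
    by_cases hc : c = '*'
    · simp [hc, ih (k + 1)]
    · simp [hc, ih (k + 1)]

lemma star_filter_one (m : List Char) :
    ∀ k : Int, m.count '*' = 1 →
      ((PySem.List.enumerate m k).filter (fun p => p.2 == '*')).map (fun p => p.1)
        = [k + (m.idxOf '*' : Int)] := by
  induction m with
  | nil => intro k h; simp at h
  | cons c m' ih =>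
    intro k h
    simp only [PySem.List.enumerate_cons, List.filter_cons]
    by_cases hc : c = '*'
    · have h0 : m'.count '*' = 0 := by simp [hc] at h; omega
      have hemp : ((PySem.List.enumerate m' (k + 1)).filter (fun p => p.2 == '*')) = [] := by
        have := star_filter_length m' (k + 1)
        rw [h0] at this
        exact List.eq_nil_of_length_eq_zero this
      simp [hc, hemp]
    · have h1 : m'.count '*' = 1 := by simpa [hc] using h
      have hidx : List.idxOf '*' (c :: m') = List.idxOf '*' m' + 1 := by simp [hc]
      simp only [Bool.false_eq_true, if_false, show (c == '*') = false by simp [hc]]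
      rw [ih (k + 1) h1, hidx]
      push_cast
      congr 1
      ring

lemma rep_eq (wl : List Char) :
    ∀ zl, (maskAB wl zl).count '*' = 1 →
      (maskAB wl zl).map star2dash
        = wl.take ((maskAB wl zl).idxOf '*') ++ '-' :: wl.drop ((maskAB wl zl).idxOf '*' + 1) := by
  induction wl with
  | nil => intro zl h; simp [maskAB] at h
  | cons c w' ih =>
    intro zl h
    simp only [maskAB] at h ⊢
    set e := (if c ≠ zl.headD ' ' then '*' else c) with he
    by_cases hstar : e = '*'
    · have h0 : (maskAB w' zl.tail).count '*' = 0 := by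
        simp [hstar] at h; omega
      have hidx : List.idxOf '*' (e :: maskAB w' zl.tail) = 0 := by
        simp [hstar]
      rw [hidx]
      simp only [List.map_cons, hstar, List.take_zero, List.nil_append, List.drop_succ_cons,
        List.drop_zero, zero_add]
      rw [map_star2dash_id _ h0, maskAB_no_star _ _ h0]
      simp [star2dash]
    · have hec : e = c := by
        by_cases hc : c = zl.headD ' '
        · rw [he, if_neg (fun hne => hne hc)]
        · have h2 : e = '*' := by rw [he, if_pos hc]
          exact absurd h2 hstar
      have hcs : c ≠ '*' := by rw [← hec]; exact hstar
      have h1 : (maskAB w' zl.tail).count '*' = 1 := by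
        simpa [hstar] using h
      have hidx : List.idxOf '*' (e :: maskAB w' zl.tail) = List.idxOf '*' (maskAB w' zl.tail) + 1 := by
        simp [hstar]
      rw [hidx, hec]
      simp only [List.map_cons, List.take_succ_cons, List.drop_succ_cons, List.cons_append]
      rw [ih zl.tail h1]
      simp [star2dash, hcs]

-- A's program in canonical form
lemma unite2_eq (grpM grpN : List String) :
    unite2 grpM grpN
      = grpM.foldl (fun ref w =>
          (grpN.filter (fun z => PySem.Str.find w "-" == PySem.Str.find z "-")).foldl
            (fun ref z => ddA ref (pairRep w z)) ref) [] := by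
  unfold unite2
  dsimp only
  refine PySem.List.foldl_congr_mem _ _ _ _ ?_
  intro ref w _
  rw [PySem.List.foldl_if_eq_foldl_filter (p := fun z => PySem.Str.find w "-" == PySem.Str.find z "-")]
  refine PySem.List.foldl_congr_mem _ _ _ _ ?_
  intro acc z _
  have hmask := maskA_fold z.toList w.toList []
  simp only [List.length_nil, Nat.cast_zero, zero_add, List.nil_append, List.drop_zero] at hmask
  rw [hmask]
  set m := maskAB w.toList z.toList with hm
  have hcount : PySem.Str.count (String.ofList m) "*" = m.count '*' := by
    rw [PySem.Str.count_eq]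
    have : (String.ofList m).toList = m := by simp
    rw [this]
    have : ("*" : String).toList = ['*'] := rfl
    rw [this, count_single]
  rw [hcount]
  have hrep : PySem.Str.replace (String.ofList m) "*" "-" = String.ofList (m.map star2dash) := by
    rw [← String.toList_inj, PySem.Str.toList_replace]
    have h1 : (String.ofList m).toList = m := by simp
    have h2 : ("*" : String).toList = ['*'] := rfl
    have h3 : ("-" : String).toList = ['-'] := rfl
    have h4 : (String.ofList (m.map star2dash)).toList = m.map star2dash := by simp
    rw [h1, h2, h3, h4, replace_star]
  by_cases hc : m.count '*' = 1
  · rw [hrep]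
    simp [pairRep, ← hm, hc, ddA]
  · have : (m.count '*' == 1) = false := by simpa using hc
    simp [pairRep, ← hm, hc, ddA, this]

-- B's program in canonical form (on inputs satisfying Pre_)
lemma unite2_alt_eq (grpM grpN : List String)
    (hpre : Pre_unite2 grpM grpN) :
    unite2_alt grpM grpN
      = (grpM.foldl (fun st w =>
          (grpN.filter (fun z => PySem.Str.find w "-" == PySem.Str.find z "-")).foldl
            (fun st z => ddB st (pairRep w z)) st) (([] : List String), PySem.Set.empty)).1 := by
  unfold unite2_alt
  dsimp only
  congr 1
  refine PySem.List.foldl_congr_mem _ _ _ _ ?_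
  intro st w hw
  have hbucket :
      (grpN.foldl (fun d z => d.modify (PySem.Str.find z "-") [] (fun l => l ++ [z]))
          PySem.Dict.empty).getD (PySem.Str.find w "-") []
        = grpN.filter (fun z => PySem.Str.find w "-" == PySem.Str.find z "-") := by
    have hfold : grpN.foldl (fun d z => d.modify (PySem.Str.find z "-") [] (fun l => l ++ [z]))
          PySem.Dict.empty
        = (grpN.map (fun z => (PySem.Str.find z "-", z))).foldl
            (fun d p => d.modify p.1 [] (fun l => l ++ [p.2])) PySem.Dict.empty := by
      rw [List.foldl_map]
    rw [hfold, PySem.Dict.getD_foldl_modify_append]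
    rw [List.filter_map]
    simp only [PySem.Dict.getD_empty, List.nil_append, List.map_map]
    rw [List.filter_congr (q := fun z => PySem.Str.find w "-" == PySem.Str.find z "-")]
    · simp [Function.comp_def]
    · intro z _
      simp only [Function.comp_apply]
      by_cases h : PySem.Str.find z "-" = PySem.Str.find w "-"
      · rw [h]
      · have h2 : ¬PySem.Str.find w "-" = PySem.Str.find z "-" := fun hh => h hh.symm
        rw [beq_eq_false_iff_ne.mpr h, beq_eq_false_iff_ne.mpr h2]
  rw [hbucket]
  refine PySem.List.foldl_congr_mem _ _ _ _ ?_
  intro st' z hz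
  have hzN : z ∈ grpN := (List.mem_filter.mp hz).1
  have hfind : PySem.Str.find w "-" = PySem.Str.find z "-" := by
    have := (List.mem_filter.mp hz).2
    simpa using this
  have hpair := hpre w hw z hzN hfind
  have hlen : w.toList.length ≤ z.toList.length := by
    have := hpair.1
    simpa [PySem.Str.len] using this
  rw [diffs_eq_stars w.toList z.toList 0 hpair.2 hlen]
  set m := maskAB w.toList z.toList with hm
  have hlenf := star_filter_length m 0
  by_cases h1 : m.count '*' = 1
  · have hone := star_filter_one m 0 h1
    rw [hone]
    simp only [List.length_cons, List.length_nil, zero_add]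
    have hi : PySem.List.pyGetD [(m.idxOf '*' : Int)] 0 0
        = (m.idxOf '*' : Int) := by
      simp [PySem.List.pyGetD, PySem.List.pyGet?, PySem.List.pyIdx?]
    rw [hi]
    have hpos : (0 : Int) ≤ (m.idxOf '*' : Int) := by positivity
    have hslice1 : PySem.List.slice w.toList none (some (m.idxOf '*' : Int))
        = w.toList.take (m.idxOf '*') := by
      rw [PySem.List.slice_to _ hpos]; simp
    have hslice2 : PySem.List.slice w.toList (some ((m.idxOf '*' : Int) + 1)) none
        = w.toList.drop (m.idxOf '*' + 1) := by
      have : (m.idxOf '*' : Int) + 1 = ((m.idxOf '*' + 1 : Nat) : Int) := by push_cast; ring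
      rw [this, PySem.List.slice_from _ (by positivity)]; simp
    rw [hslice1, hslice2]
    have hrep : w.toList.take (m.idxOf '*') ++ ['-'] ++ w.toList.drop (m.idxOf '*' + 1)
        = m.map star2dash := by
      rw [rep_eq w.toList z.toList (by rw [← hm]; exact h1)]
      simp [← hm]
    rw [hrep]
    simp [pairRep, ← hm, h1, ddB]
  · have hne : (((PySem.List.enumerate m 0).filter (fun p => p.2 == '*')).map
        (fun p => p.1)).length ≠ 1 := by
      rw [List.length_map, hlenf]; exact h1
    have : ((((PySem.List.enumerate m 0).filter (fun p => p.2 == '*')).map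
        (fun p => p.1)).length == 1) = false := by simpa using hne
    simp only [this, Bool.false_eq_true, if_false]
    simp [pairRep, ← hm, h1, ddB]

lemma contains_ofList (xs : List String) (r : String) :
    PySem.Set.contains (PySem.Set.ofList xs) r = xs.contains r := by
  by_cases hr : r ∈ xs
  · have h1 : r ∈ PySem.Set.ofList xs := (PySem.Set.mem_ofList xs r).mpr hr
    simp [PySem.Set.contains, hr, h1]
  · have h1 : r ∉ PySem.Set.ofList xs := fun h => hr ((PySem.Set.mem_ofList xs r).mp h)
    simp [PySem.Set.contains, hr, h1]

lemma dd_fold (l : List String) (w : String) :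
    ∀ (st : List String × PySem.Set String), st.2 = PySem.Set.ofList st.1 →
      l.foldl (fun st z => ddB st (pairRep w z)) st
        = (l.foldl (fun ref z => ddA ref (pairRep w z)) st.1,
           PySem.Set.ofList (l.foldl (fun ref z => ddA ref (pairRep w z)) st.1)) := by
  induction l with
  | nil =>
    intro st h
    simp only [List.foldl_nil]
    exact Prod.ext rfl h
  | cons z l' ih =>
    intro st h
    simp only [List.foldl_cons]
    cases hp : pairRep w z with
    | none => simp only [ddA, ddB]; exact ih st h
    | some r =>
      simp only [ddA, ddB]
      have hc : PySem.Set.contains st.2 r = st.1.contains r := by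
        rw [h, contains_ofList]
      rw [hc]
      by_cases hin : st.1.contains r
      · simp only [hin, if_true]
        exact ih st h
      · simp only [hin, Bool.false_eq_true, if_false]
        refine ih (st.1 ++ [r], st.2.add r) ?_
        rw [h, PySem.Set.ofList_append_singleton]

lemma outer_fold (grpM : List String) (g : String → List String) :
    ∀ (st : List String × PySem.Set String), st.2 = PySem.Set.ofList st.1 →
      (grpM.foldl (fun st w => (g w).foldl (fun st z => ddB st (pairRep w z)) st) st).1
        = grpM.foldl (fun ref w => (g w).foldl (fun ref z => ddA ref (pairRep w z)) ref) st.1 := by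
  induction grpM with
  | nil => intro st _; rfl
  | cons w grpM' ih =>
    intro st h
    simp only [List.foldl_cons]
    rw [dd_fold (g w) w st h]
    exact ih _ rfl

-- ===== VERDICT (by name: the statement is the Claim_ definition above) =====
theorem unite2_spec : Claim_equal_unite2 := by
  intro grpM grpN _ hpre
  unfold Spec_unite2
  rw [unite2_eq, unite2_alt_eq grpM grpN hpre]
  rw [outer_fold grpM
    (fun w => grpN.filter (fun z => PySem.Str.find w "-" == PySem.Str.find z "-"))
    (([] : List String), PySem.Set.empty) rfl]
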